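-- pv_equiv track=rewrite | github.com/sambergin/OldWork | mod.py | add_inv_table
-- ===== SOURCE A (Python) =====
-- def residue_list(mod):
--
--     if (type(mod) != int) or mod <= 0:
--         r_list = "Error(residue_list): Invalid mod"
--     else:
--         r_list = []
--         for i in range(mod):
--             r_list.append(i)
--
--     return r_list
--
-- def add_inv(a,m):
--     if type(m) != int or m <= 0:
--         result = 'Error(add_inv): Invalid mod'
--     elif type(a) != int:
--         result = 'Error(add_inv): Invalid input num'
--
--     else:
--         result = 0
--         rlist = residue_list(m)
--         for i in range(m):
--             if (a + rlist[i]) % m == 0: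
--                 result = rlist[i]
--
--
--
--
--
--
--
--
--
--
--
--     return result
--
-- def add_inv_table(m):
--     if type(m) != int or m <= 0:
--         table = "Error(add_inv_table): Invalid mod"
--     else:
--         table = []
--         r1 = []
--         r2 = []
--         for i in range(m):
--             r1.append(i)
--         table.append(r1)
--
--         for i in range(m):
--             r2.append(add_inv(r1[i],m))
--
--         table.append(r2)
--
--     return table
-- ===== SOURCE B (Python) =====
-- def add_inv_table(m):
--     if type(m) != int or m <= 0:
--         return "Error(add_inv_table): Invalid mod"
--     r = list(range(m))
--     return [r, [(m - a) % m for a in r]]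
-- ===== Notes on version B (the rewrite author's own statement) =====
-- stated objective: faster
-- what changed: Replaces the O(m) linear scan per residue (which itself rebuilds the residue list) with the closed-form additive inverse (m - a) % m computed in one comprehension.
import Mathlib
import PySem

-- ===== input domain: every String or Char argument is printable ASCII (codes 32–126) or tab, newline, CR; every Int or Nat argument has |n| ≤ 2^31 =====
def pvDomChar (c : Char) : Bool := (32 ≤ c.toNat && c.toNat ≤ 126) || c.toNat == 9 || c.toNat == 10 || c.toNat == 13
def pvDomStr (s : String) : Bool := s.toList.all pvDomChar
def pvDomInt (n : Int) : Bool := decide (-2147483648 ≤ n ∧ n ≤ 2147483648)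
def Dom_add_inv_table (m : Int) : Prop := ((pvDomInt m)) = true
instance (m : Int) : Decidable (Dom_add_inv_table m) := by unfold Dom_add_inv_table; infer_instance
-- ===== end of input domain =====

-- B replaces A's per-entry linear scan (O(m^2) total) with the closed form (m - a) % m, O(m) total.
-- On m <= 0 both Pythons return the same error STRING (not a list of lists); Pre_ excludes those inputs.

-- ===== PORT A =====
-- residue_list(m) for m > 0: appends 0..m-1
def residue_listA (m : Int) : List Int :=
  (PySem.List.pyRange 0 m 1).foldl (fun acc i => acc ++ [i]) []

-- add_inv(a, m) for ints with m > 0: last i in range(m) with (a + rlist[i]) % m == 0, else 0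
def add_invA (a m : Int) : Int :=
  (PySem.List.pyRange 0 m 1).foldl
    (fun result i =>
      if PySem.Int.mod (a + PySem.List.pyGetD (residue_listA m) i 0) m = 0
      then PySem.List.pyGetD (residue_listA m) i 0 else result) 0

def add_inv_table (m : Int) : List (List Int) :=
  if m ≤ 0 then []  -- Python returns an error string here; excluded by Pre_
  else
    let r1 := (PySem.List.pyRange 0 m 1).foldl (fun acc i => acc ++ [i]) []
    let r2 := (PySem.List.pyRange 0 m 1).foldl
      (fun acc i => acc ++ [add_invA (PySem.List.pyGetD r1 i 0) m]) []
    [r1, r2]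

-- ===== PORT B =====
def add_inv_table_alt (m : Int) : List (List Int) :=
  if m ≤ 0 then []  -- Python returns an error string here; excluded by Pre_
  else
    let r := PySem.List.pyRange 0 m 1
    [r, r.map (fun a => PySem.Int.mod (m - a) m)]

-- ===== PRECONDITION & SPEC =====
-- Pre_ excludes m ≤ 0, on which both Pythons return an error STRING, not a value of List (List Int).
def Pre_add_inv_table (m : Int) : Prop := 0 < m
instance (m : Int) : Decidable (Pre_add_inv_table m) := by unfold Pre_add_inv_table; infer_instance
def pvWitness_add_inv_table : Int := 3

def Spec_add_inv_table (m : Int) (out : List (List Int)) : Prop := out = add_inv_table_alt m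
instance (m : Int) (out : List (List Int)) : Decidable (Spec_add_inv_table m out) := by unfold Spec_add_inv_table; infer_instance

-- ===== CLAIM (what is proved, stated in full; the proofs are below) =====
def Claim_equal_add_inv_table : Prop := ∀ (m : Int), Dom_add_inv_table m → Pre_add_inv_table m → Spec_add_inv_table m (add_inv_table m)

-- ===== LEMMAS AND PROOFS =====

lemma residue_listA_eq (m : Int) : residue_listA m = PySem.List.pyRange 0 m 1 := by
  simp only [residue_listA, PySem.List.foldl_append_singleton_eq_self, List.nil_append]

lemma pyGetD_range_self (m i : Int) (h0 : 0 ≤ i) (h1 : i < m) :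
    PySem.List.pyGetD (PySem.List.pyRange 0 m 1) i 0 = i := by
  have := PySem.List.pyGetD_map_pyRange_of_nonneg (f := id) (n := m) (i := i) (d := 0) h0 h1
  simpa using this

-- core loop invariant: the scan of range(k) returns (m-a)%m once the scan has passed it, else 0
lemma add_inv_scan (a m : Int) (h0a : 0 ≤ a) (ham : a < m) (k : Nat) (hk : (k : Int) ≤ m) :
    (PySem.List.pyRange 0 (k : Int) 1).foldl
      (fun result i => if PySem.Int.mod (a + i) m = 0 then i else result) 0
    = if PySem.Int.mod (m - a) m < (k : Int) then PySem.Int.mod (m - a) m else 0 := by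
  have hm : (0:Int) < m := lt_of_le_of_lt h0a ham
  induction k with
  | zero =>
    have hnn := PySem.Int.mod_nonneg (m - a) hm
    simp [PySem.List.pyRange_one_eq_nil (le_refl (0:Int))]
    omega
  | succ n ih =>
    have hn : (n : Int) ≤ m := by push_cast at hk ⊢; omega
    have hrw : ((n + 1 : Nat) : Int) = (n : Int) + 1 := by push_cast; ring
    rw [hrw, PySem.List.pyRange_one_succ_right (by positivity : (0:Int) ≤ (n:Int)),
        List.foldl_append, ih hn]
    have htgt : PySem.Int.mod (m - a) m = if a = 0 then 0 else m - a := by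
      by_cases ha : a = 0
      · subst ha; simp [PySem.Int.mod_eq_zero_iff_dvd]
      · have : PySem.Int.mod (m - a) m = (m - a) % m := PySem.Int.mod_eq_emod_of_pos hm
        rw [this, Int.emod_eq_of_lt (by omega) (by omega)]
        simp [ha]
    have hcond : (PySem.Int.mod (a + (n:Int)) m = 0) ↔ m ∣ (a + n) := PySem.Int.mod_eq_zero_iff_dvd _ _
    by_cases hdvd : m ∣ (a + (n:Int))
    · -- a + n divisible by m with 0 ≤ a+n < 2m and n ≤ m: a+n = 0 or a+n = m
      have hcases : a + (n:Int) = 0 ∨ a + (n:Int) = m := by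
        rcases hdvd with ⟨c, hc⟩
        have hge : 0 ≤ c := by
          by_contra h
          push Not at h
          have hle : m * c ≤ m * (-1) := mul_le_mul_of_nonneg_left (by omega) hm.le
          linarith
        have hlt : c < 2 := by
          by_contra h
          push Not at h
          have hle : m * 2 ≤ m * c := mul_le_mul_of_nonneg_left h hm.le
          linarith
        interval_cases c <;> simp at hc <;> omega
      have hn_eq : (n : Int) = PySem.Int.mod (m - a) m := by
        rcases hcases with h | h
        · have ha0 : a = 0 := by omega
          rw [htgt]; simp [ha0]; omega
        · have ha0 : a ≠ 0 := by omega
          rw [htgt]; simp [ha0]; omega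
      simp only [List.foldl_cons, List.foldl_nil]
      rw [if_pos (hcond.mpr hdvd), ← hn_eq]
      split_ifs <;> omega
    · have : ¬ PySem.Int.mod (a + (n:Int)) m = 0 := fun h => hdvd (hcond.mp h)
      simp only [List.foldl_cons, List.foldl_nil, if_neg this]
      -- target ≠ n here
      have hne : PySem.Int.mod (m - a) m ≠ (n : Int) := by
        intro he
        apply hdvd
        rw [htgt] at he
        by_cases ha : a = 0
        · simp [ha] at he; exact ⟨0, by omega⟩
        · simp [ha] at he; exact ⟨1, by omega⟩
      have hnn := PySem.Int.mod_nonneg (m - a) hm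
      split_ifs with h1 h2 h2 <;> omega

lemma add_invA_eq (a m : Int) (h0a : 0 ≤ a) (ham : a < m) :
    add_invA a m = PySem.Int.mod (m - a) m := by
  have hm : (0:Int) < m := lt_of_le_of_lt h0a ham
  unfold add_invA
  simp only [residue_listA_eq]
  have hcg : (PySem.List.pyRange 0 m 1).foldl
      (fun result i =>
        if PySem.Int.mod (a + PySem.List.pyGetD (PySem.List.pyRange 0 m 1) i 0) m = 0
        then PySem.List.pyGetD (PySem.List.pyRange 0 m 1) i 0 else result) 0
    = (PySem.List.pyRange 0 m 1).foldl
      (fun result i => if PySem.Int.mod (a + i) m = 0 then i else result) 0 := by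
    apply PySem.List.foldl_congr_mem
    intro acc x hx
    rcases (PySem.List.mem_pyRange_one).mp hx with ⟨hx0, hx1⟩
    rw [pyGetD_range_self m x hx0 hx1]
  rw [hcg]
  have hk : ((m.toNat : Int)) ≤ m := by omega
  have := add_inv_scan a m h0a ham m.toNat hk
  rw [(by omega : ((m.toNat : Int)) = m)] at this
  rw [this, if_pos (PySem.Int.mod_lt (m - a) hm)]

-- ===== VERDICT (by name: the statement is the Claim_ definition above) =====
theorem add_inv_table_spec : Claim_equal_add_inv_table := by
  intro m _ hpre
  unfold Spec_add_inv_table add_inv_table add_inv_table_alt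
  have hm : ¬ m ≤ 0 := not_le.mpr hpre
  simp only [if_neg hm]
  rw [PySem.List.foldl_append_singleton_eq_self, PySem.List.foldl_append_singleton_eq_map]
  simp only [List.nil_append]
  congr 1
  congr 1
  apply List.map_congr_left
  intro x hx
  rcases (PySem.List.mem_pyRange_one).mp hx with ⟨hx0, hx1⟩
  rw [pyGetD_range_self m x hx0 hx1, add_invA_eq x m hx0 hx1]
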